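-- pv_equiv track=rewrite | github.com/alfredholmes/abm_job_locations | Data Analysis/Company Filtering/SIC/2017/la_totals_removing_high_error_sic.py | get_band
-- ===== SOURCE A (Python) =====
-- BANDS = [(1, 4),
--          (5, 40),
--          (41, 44),
--          (45, 46),
--          (46, 47),
--          (47, 48),
--          (49, 54),
--          (55, 57),
--          (58, 64),
--          (64, 67),
--          (68, 69),
--          (69, 76),
--          (77, 83),
--          (84, 85),
--          (85, 86),
--          (86, 88),
--          (90, 99)
--         ]
--
-- def get_band(x):
--     b = BANDS[:]
--     while len(b) > 1:
--         target = int((len(b) + 1) / 2)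
--         if x < b[target][1]:
--             if x >= b[target][0]:
--                 return b[target]
--             b = b[:target]
--         else:
--             b = b[target:]
--     if x >= b[0][0] and x < b[0][1]:
--         return b[0]
--     else:
--         return None
-- ===== SOURCE B (Python) =====
-- BANDS = [(1, 4),(5, 40),(41, 44),(45, 46),(46, 47),(47, 48),(49, 54),(55, 57),(58, 64),(64, 67),(68, 69),(69, 76),(77, 83),(84, 85),(85, 86),(86, 88),(90, 99)]
-- def get_band(x):
--     for band in BANDS:
--         if band[0] <= x < band[1]:
--             return band
--     return None
-- ===== Notes on version B (the rewrite author's own statement) =====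
-- stated objective: simpler
-- what changed: Replaced the hand-rolled binary search over shrinking slices of BANDS with a single linear scan that returns the first (and only) band with lo <= x < hi.
import Mathlib
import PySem

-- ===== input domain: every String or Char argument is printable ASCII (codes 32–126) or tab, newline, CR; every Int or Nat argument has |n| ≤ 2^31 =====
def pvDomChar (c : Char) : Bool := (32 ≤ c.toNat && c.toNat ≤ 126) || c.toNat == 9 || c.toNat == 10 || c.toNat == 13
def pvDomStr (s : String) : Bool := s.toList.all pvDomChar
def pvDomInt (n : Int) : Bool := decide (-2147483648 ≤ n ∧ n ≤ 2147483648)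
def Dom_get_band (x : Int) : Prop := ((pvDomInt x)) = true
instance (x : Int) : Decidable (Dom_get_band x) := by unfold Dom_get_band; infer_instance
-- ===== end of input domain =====

-- B replaces A's manual binary search over shrinking slices of BANDS with a single
-- linear scan (the bands are sorted and disjoint, so at most one contains x); objective: simpler.

def pvBANDS : List (Int × Int) :=
  [(1, 4), (5, 40), (41, 44), (45, 46), (46, 47), (47, 48), (49, 54), (55, 57),
   (58, 64), (64, 67), (68, 69), (69, 76), (77, 83), (84, 85), (85, 86), (86, 88), (90, 99)]

-- ===== PORT A =====
-- the while-loop of A: b shrinks to b[:target] or b[target:] each round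
def get_band_go (x : Int) (b : List (Int × Int)) : Option (Int × Int) :=
  if _h : b.length > 1 then
    -- target = int((len(b)+1)/2); exact for these small positive lengths
    let target : Nat := (b.length + 1) / 2
    match b[target]? with
    | some p =>
      if x < p.2 then
        if x ≥ p.1 then some p
        else get_band_go x (b.take target)
      else get_band_go x (b.drop target)
    | none => none   -- IndexError: unreachable, target < len(b) whenever len(b) > 1
  else
    match b[0]? with
    | some p => if x ≥ p.1 ∧ x < p.2 then some p else none
    | none => none   -- IndexError on empty b: unreachable, BANDS is non-empty
termination_by b.length
decreasing_by
  · simp only [List.length_take]; omega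
  · simp only [List.length_drop]; omega

def get_band (x : Int) : Option (Int × Int) := get_band_go x pvBANDS

-- ===== PORT B =====
def get_band_scan (x : Int) : List (Int × Int) → Option (Int × Int)
  | [] => none
  | p :: rest => if p.1 ≤ x ∧ x < p.2 then some p else get_band_scan x rest

def get_band_alt (x : Int) : Option (Int × Int) := get_band_scan x pvBANDS

-- ===== PRECONDITION & SPEC =====
def Spec_get_band (x : Int) (out : Option (Int × Int)) : Prop := out = get_band_alt x
instance (x : Int) (out : Option (Int × Int)) : Decidable (Spec_get_band x out) := by unfold Spec_get_band; infer_instance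

-- ===== CLAIM (what is proved, stated in full; the proofs are below) =====
def Claim_equal_get_band : Prop := ∀ (x : Int), Dom_get_band x → Spec_get_band x (get_band x)

-- ===== LEMMAS AND PROOFS =====

-- bands sorted and disjoint: each band ends no later than the next one starts
def pvDisj (b : List (Int × Int)) : Prop := b.Pairwise (fun p q => p.2 ≤ q.1)
-- each band is an honest interval
def pvWF (b : List (Int × Int)) : Prop := ∀ p ∈ b, p.1 ≤ p.2

theorem scan_append (x : Int) (l₁ l₂ : List (Int × Int)) :
    get_band_scan x (l₁ ++ l₂) =
      ((get_band_scan x l₁).rec (get_band_scan x l₂) (fun p => some p)) := by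
  induction l₁ with
  | nil => simp [get_band_scan]
  | cons p rest ih =>
    simp only [List.cons_append, get_band_scan]
    split_ifs <;> simp [ih]

theorem scan_none (x : Int) (l : List (Int × Int))
    (h : ∀ p ∈ l, ¬ (p.1 ≤ x ∧ x < p.2)) : get_band_scan x l = none := by
  induction l with
  | nil => rfl
  | cons p rest ih =>
    simp only [get_band_scan]
    rw [if_neg (h p (by simp))]
    exact ih (fun q hq => h q (by simp [hq]))

theorem go_eq_scan (x : Int) :
    ∀ (n : Nat) (b : List (Int × Int)), b.length ≤ n → pvDisj b → pvWF b →
      get_band_go x b = get_band_scan x b := by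
  intro n
  induction n with
  | zero =>
    intro b hb _ _
    have : b = [] := List.eq_nil_of_length_eq_zero (Nat.le_zero.mp hb)
    subst this; rw [get_band_go]; rfl
  | succ n ih =>
    intro b hb hdisj hwf
    by_cases hlen : b.length > 1
    · -- the binary-search step
      set target : Nat := (b.length + 1) / 2 with htarget
      have ht1 : 1 ≤ target := by omega
      have ht2 : target < b.length := by omega
      obtain ⟨p, hp⟩ : ∃ p, b[target]? = some p :=
        ⟨b[target], List.getElem?_eq_getElem ht2⟩
      have hsplit : b.take target ++ b.drop target = b := List.take_append_drop _ _
      have hdrop : b.drop target = p :: b.drop (target + 1) := by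
        rw [List.drop_eq_getElem_cons ht2]
        simp [List.getElem?_eq_getElem ht2] at hp
        simp [hp]
      -- pairwise facts across the split
      have hpair : ∀ q ∈ b.take target, ∀ r ∈ b.drop target, q.2 ≤ r.1 := by
        have := hdisj
        rw [← hsplit] at this
        exact (List.pairwise_append.mp this).2.2
      have hpmem : p ∈ b.drop target := by rw [hdrop]; simp
      have hdisj_take : pvDisj (b.take target) := hdisj.sublist (List.take_sublist _ _)
      have hdisj_drop : pvDisj (b.drop target) := hdisj.sublist (List.drop_sublist _ _)
      have hwf_take : pvWF (b.take target) :=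
        fun q hq => hwf q (List.mem_of_mem_take hq)
      have hwf_drop : pvWF (b.drop target) :=
        fun q hq => hwf q (List.mem_of_mem_drop hq)
      have hlt : b.length - 1 ≤ n := by omega
      rw [get_band_go]
      rw [dif_pos hlen]
      simp only [← htarget, hp]
      by_cases h2 : x < p.2
      · rw [if_pos h2]
        by_cases h1 : x ≥ p.1
        · -- x in band p: scan of b finds p first
          rw [if_pos h1]
          rw [← hsplit, scan_append]
          have hnone : get_band_scan x (b.take target) = none := by
            apply scan_none
            intro q hq hcontra
            have := hpair q hq p hpmem
            omega
          rw [hnone, hdrop]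
          simp only [get_band_scan]
          rw [if_pos ⟨h1, h2⟩]
        · -- x below band p: x misses all of the drop part
          rw [if_neg h1]
          rw [ih _ (by simp [List.length_take]; omega) hdisj_take hwf_take]
          conv_rhs => rw [← hsplit]
          rw [scan_append]
          have hnone : get_band_scan x (b.drop target) = none := by
            apply scan_none
            intro r hr hcontra
            rw [hdrop] at hr
            rcases List.mem_cons.mp hr with h | h
            · subst h; omega
            · have hpr : p.2 ≤ r.1 := by
                have := hdisj_drop
                rw [hdrop] at this
                exact (List.pairwise_cons.mp this).1 r h
              have := hwf p (List.mem_of_mem_drop hpmem)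
              omega
          rw [hnone]
          cases get_band_scan x (b.take target) <;> rfl
      · -- x at or above p's end: x misses all of the take part
        rw [if_neg h2]
        rw [ih _ (by simp [List.length_drop]; omega) hdisj_drop hwf_drop]
        conv_rhs => rw [← hsplit]
        rw [scan_append]
        have hnone : get_band_scan x (b.take target) = none := by
          apply scan_none
          intro q hq hcontra
          have h1 := hpair q hq p hpmem
          have h2 := hwf p (List.mem_of_mem_drop hpmem)
          omega
        rw [hnone]
    · -- final one-element (or empty) step
      rw [get_band_go, dif_neg hlen]
      rcases b with _ | ⟨p, _ | ⟨q, rest⟩⟩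
      · rfl
      · simp only [List.getElem?_cons_zero, get_band_scan]
      · exact absurd (by simp) hlen

-- ===== VERDICT (by name: the statement is the Claim_ definition above) =====
theorem get_band_spec : Claim_equal_get_band := by
  intro x _
  unfold Spec_get_band get_band get_band_alt
  exact go_eq_scan x pvBANDS.length pvBANDS le_rfl (by unfold pvDisj pvBANDS; decide)
    (by unfold pvWF pvBANDS; decide)
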